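-- pv_equiv track=rewrite | github.com/zxgsy520/pedigree | pedigree.py | get_gene_count
-- ===== SOURCE A (Python) =====
-- def get_gene_count(group):
--
--     genes = []
--     counts = []
--     n = 0
--
--     for i in group:
--         if n >= 1:
--             if i:
--                 i = i.replace(" ", "").split(",")
--                 genes.append(i)
--                 counts.append(len(i))
--             else:
--                 genes.append([])
--                 counts.append(0)
--         n += 1
--
--     return genes, counts
-- ===== SOURCE B (Python) =====
-- def get_gene_count(group):
--     genes = []
--     counts = []
--     it = iter(group)
--     next(it, None)
--     for row in it:
--         if not row:
--             genes.append([])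
--             counts.append(0)
--             continue
--         toks = []
--         cur = []
--         for ch in row:
--             if ch == ' ':
--                 continue
--             if ch == ',':
--                 toks.append(''.join(cur))
--                 cur = []
--             else:
--                 cur.append(ch)
--         toks.append(''.join(cur))
--         genes.append(toks)
--         counts.append(len(toks))
--     return genes, counts
-- ===== Notes on version B (the rewrite author's own statement) =====
-- stated objective: alternative
-- what changed: Replaces A's counter-guarded loop that calls replace(' ','') then split(',') on each row by an iterator skip of the first row and a hand-written single character-scan tokenizer per row that drops spaces and cuts tokens at commas in one pass.
import Mathlib
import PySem

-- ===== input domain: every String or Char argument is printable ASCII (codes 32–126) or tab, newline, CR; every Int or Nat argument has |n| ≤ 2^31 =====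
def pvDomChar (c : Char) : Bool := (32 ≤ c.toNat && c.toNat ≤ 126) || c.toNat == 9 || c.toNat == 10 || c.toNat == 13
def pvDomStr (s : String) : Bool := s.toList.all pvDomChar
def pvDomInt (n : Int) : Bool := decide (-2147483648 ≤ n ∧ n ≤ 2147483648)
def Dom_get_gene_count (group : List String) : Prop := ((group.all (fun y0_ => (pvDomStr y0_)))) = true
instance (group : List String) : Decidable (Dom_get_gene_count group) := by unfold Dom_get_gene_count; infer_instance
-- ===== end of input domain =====

-- B replaces A's per-row replace(" ","")+split(",") library calls and counter-guarded loop by a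
-- single character-scan tokenizer per row (skip spaces, cut at commas); objective: alternative.

-- ===== PORT A =====
-- loop body of A: state (genes, counts, n); acts only when n >= 1, then n += 1
def pvStepA (st : List (List String) × List Int × Int) (i : String) :
    List (List String) × List Int × Int :=
  let st' :=
    if st.2.2 ≥ 1 then
      if i ≠ "" then
        let iSplit := (PySem.Str.split? (PySem.Str.replace i " " "") ",").getD []
        (st.1 ++ [iSplit], st.2.1 ++ [(iSplit.length : Int)], st.2.2)
      else
        (st.1 ++ [([] : List String)], st.2.1 ++ [(0 : Int)], st.2.2)
    else st
  (st'.1, st'.2.1, st'.2.2 + 1)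

def get_gene_count (group : List String) : List (List String) × List Int :=
  let st := group.foldl pvStepA ([], [], (0 : Int))
  (st.1, st.2.1)

-- ===== PORT B =====
-- inner character loop of B: cur accumulates the current token, toks the finished ones
def pvTokB : List Char → List Char → List String
  | [], cur => [String.ofList cur]
  | c :: t, cur =>
    if c = ' ' then pvTokB t cur
    else if c = ',' then String.ofList cur :: pvTokB t []
    else pvTokB t (cur ++ [c])

-- outer row loop of B (runs on the rows after the first)
def pvLoopB : List String → List (List String) × List Int → List (List String) × List Int
  | [], st => st
  | r :: t, st =>
    if r = "" then pvLoopB t (st.1 ++ [[]], st.2 ++ [(0 : Int)])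
    else
      let toks := pvTokB r.toList []
      pvLoopB t (st.1 ++ [toks], st.2 ++ [(toks.length : Int)])

def get_gene_count_alt (group : List String) : List (List String) × List Int :=
  match group with
  | [] => ([], [])
  | _ :: t => pvLoopB t ([], [])

-- ===== PRECONDITION & SPEC =====
def Spec_get_gene_count (group : List String) (out : List (List String) × List Int) : Prop := out = get_gene_count_alt group
instance (group : List String) (out : List (List String) × List Int) : Decidable (Spec_get_gene_count group out) := by unfold Spec_get_gene_count; infer_instance

-- ===== CLAIM (what is proved, stated in full; the proofs are below) =====
def Claim_equal_get_gene_count : Prop := ∀ (group : List String), Dom_get_gene_count group → Spec_get_gene_count group (get_gene_count group)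

-- ===== LEMMAS AND PROOFS =====

-- A's per-row value
def pvF (i : String) : List String :=
  if i ≠ "" then (PySem.Str.split? (PySem.Str.replace i " " "") ",").getD [] else []

-- splitting a (space-free) char list at commas, Python split(",") style
def pvAppHead (p : List Char) : List (List Char) → List (List Char)
  | [] => [p]
  | h :: tl => (p ++ h) :: tl

def pvSplitChar : List Char → List (List Char)
  | [] => [[]]
  | c :: t => if c = ',' then [] :: pvSplitChar t else pvAppHead [c] (pvSplitChar t)

lemma pvSplitChar_ne_nil (l : List Char) : pvSplitChar l ≠ [] := by
  cases l with
  | nil => simp [pvSplitChar]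
  | cons c t =>
    simp only [pvSplitChar]
    split
    · simp
    · cases h : pvSplitChar t <;> simp [pvAppHead]

lemma pvAppHead_nil (xs : List (List Char)) (h : xs ≠ []) : pvAppHead [] xs = xs := by
  cases xs with
  | nil => exact absurd rfl h
  | cons a b => simp [pvAppHead]

lemma pvAppHead_appHead (p q : List Char) (xs : List (List Char)) :
    pvAppHead p (pvAppHead q xs) = pvAppHead (p ++ q) xs := by
  cases xs <;> simp [pvAppHead]

-- replace(" ", "") is filtering out spaces
lemma replace_go_filter (l : List Char) : ∀ (fuel : Nat) (acc : List Char), l.length ≤ fuel →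
    PySem.Chars.replace.go [' '] [] fuel l acc = acc.reverse ++ l.filter (fun c => c != ' ') := by
  induction l with
  | nil => intro fuel acc _; cases fuel <;> simp [PySem.Chars.replace.go]
  | cons c t ih =>
    intro fuel acc hf
    cases fuel with
    | zero => simp at hf
    | succ f =>
      simp only [PySem.Chars.replace.go]
      by_cases hc : c = ' '
      · subst hc
        simp only [List.isPrefixOf, BEq.rfl, Bool.true_and, if_true,
          List.length_singleton, List.drop_one, List.tail_cons, List.reverse_nil, List.nil_append]
        rw [ih f _ (by simpa using hf)]
        simp
      · have : ([' '].isPrefixOf (c :: t)) = false := by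
          simp [List.isPrefixOf]; exact fun h => (hc h.symm).elim
        rw [this]
        simp only [Bool.false_eq_true, if_false]
        rw [ih f _ (by simpa using hf)]
        simp [hc]

-- split(",") is pvSplitChar
lemma splitOn_go_splitChar (l : List Char) : ∀ (fuel : Nat) (cur : List Char) (acc : List (List Char)),
    l.length ≤ fuel →
    PySem.Chars.splitOn.go [','] fuel l cur acc
      = acc.reverse ++ pvAppHead cur.reverse (pvSplitChar l) := by
  induction l with
  | nil =>
    intro fuel cur acc _
    cases fuel <;> simp [PySem.Chars.splitOn.go, pvSplitChar, pvAppHead]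
  | cons c t ih =>
    intro fuel cur acc hf
    cases fuel with
    | zero => simp at hf
    | succ f =>
      simp only [PySem.Chars.splitOn.go]
      by_cases hc : c = ','
      · subst hc
        simp only [List.isPrefixOf, BEq.rfl, Bool.true_and, if_true,
          List.length_singleton, List.drop_one, List.tail_cons, List.reverse_nil]
        rw [ih f [] _ (by simpa using hf)]
        simp only [List.reverse_nil]
        rw [pvAppHead_nil _ (pvSplitChar_ne_nil t)]
        simp [pvSplitChar, pvAppHead]
      · have : ([','].isPrefixOf (c :: t)) = false := by
          simp [List.isPrefixOf]; exact fun h => (hc h.symm).elim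
        rw [this]
        simp only [Bool.false_eq_true, if_false]
        rw [ih f _ _ (by simpa using hf)]
        simp only [pvSplitChar, hc, if_false, List.reverse_cons]
        rw [pvAppHead_appHead]

-- B's tokenizer computes split-after-filter
lemma pvTokB_eq (cs : List Char) : ∀ (cur : List Char),
    pvTokB cs cur = (pvAppHead cur (pvSplitChar (cs.filter (fun c => c != ' ')))).map String.ofList := by
  induction cs with
  | nil => intro cur; simp [pvTokB, pvSplitChar, pvAppHead]
  | cons c t ih =>
    intro cur
    by_cases hsp : c = ' '
    · subst hsp; simp [pvTokB, ih]
    · by_cases hcm : c = ','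
      · subst hcm
        have h1 : ((',' : Char) = ' ') = False := by simp
        simp only [pvTokB, h1, if_false, ih, List.filter_cons,
          show ((',' : Char) != ' ') = true from by decide, if_true]
        rw [pvAppHead_nil _ (pvSplitChar_ne_nil _)]
        simp only [pvSplitChar]
        cases h : pvSplitChar (t.filter (fun c => c != ' ')) with
        | nil => exact absurd h (pvSplitChar_ne_nil _)
        | cons a b => simp [pvAppHead]
      · simp only [pvTokB, if_neg hsp, if_neg hcm, ih, List.filter_cons,
          show (c != ' ') = true by simpa using hsp, if_true]
        simp only [pvSplitChar, if_neg hcm]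
        rw [pvAppHead_appHead]

-- per row: A's replace+split equals B's tokenizer
lemma pvF_row (r : String) (hr : r ≠ "") : pvF r = pvTokB r.toList [] := by
  unfold pvF
  rw [if_pos hr, pvTokB_eq]
  rw [pvAppHead_nil _ (pvSplitChar_ne_nil _)]
  have hrep : (PySem.Str.replace r " " "").toList = r.toList.filter (fun c => c != ' ') := by
    rw [PySem.Str.toList_replace]
    show PySem.Chars.replace r.toList [' '] [] = _
    unfold PySem.Chars.replace
    rw [if_neg (by simp)]
    rw [replace_go_filter _ _ _ (le_refl _)]
    simp
  have hsplit : PySem.Str.split? (PySem.Str.replace r " " "") ","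
      = some ((pvSplitChar (r.toList.filter (fun c => c != ' '))).map String.ofList) := by
    unfold PySem.Str.split?
    show Option.map _ (PySem.Chars.split? _ [',']) = _
    unfold PySem.Chars.split?
    rw [if_neg (by simp)]
    unfold PySem.Chars.splitOn
    rw [splitOn_go_splitChar _ _ _ _ (Nat.le_succ _)]
    simp only [List.reverse_nil, List.nil_append]
    rw [hrep, pvAppHead_nil _ (pvSplitChar_ne_nil _)]
    simp
  rw [hsplit]
  rfl

-- B's per-row value equals A's per-row value
def pvRowB (r : String) : List String := if r ≠ "" then pvTokB r.toList [] else []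

lemma pvF_eq_pvRowB (r : String) : pvF r = pvRowB r := by
  unfold pvRowB
  by_cases hr : r = ""
  · subst hr; simp [pvF]
  · rw [if_pos hr]; exact pvF_row r hr

-- A's loop once past the first row
lemma get_gene_count_loop (rest : List String) : ∀ (genes : List (List String))
    (counts : List Int) (n : Int), 1 ≤ n →
    rest.foldl pvStepA (genes, counts, n)
    = (genes ++ rest.map pvF,
       counts ++ rest.map (fun i => ((pvF i).length : Int)),
       n + rest.length) := by
  induction rest with
  | nil => intro genes counts n _; simp
  | cons i t ih =>
    intro genes counts n hn
    simp only [List.foldl_cons]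
    by_cases hi : i = ""
    · subst hi
      simp only [pvStepA, ge_iff_le, if_pos hn, ne_eq, not_true_eq_false, if_false]
      rw [ih _ _ _ (by omega)]
      simp [pvF]
      omega
    · simp only [pvStepA, ge_iff_le, if_pos hn, ne_eq, hi, not_false_eq_true, if_true]
      rw [ih _ _ _ (by omega)]
      simp [pvF, hi]
      omega

-- B's loop
lemma pvLoopB_eq (rest : List String) : ∀ (st : List (List String) × List Int),
    pvLoopB rest st = (st.1 ++ rest.map pvRowB, st.2 ++ rest.map (fun r => ((pvRowB r).length : Int))) := by
  induction rest with
  | nil => intro st; simp [pvLoopB]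
  | cons r t ih =>
    intro st
    by_cases hr : r = ""
    · subst hr
      simp only [pvLoopB]
      rw [ih]
      simp [pvRowB]
    · simp only [pvLoopB, if_neg hr]
      rw [ih]
      simp [pvRowB, hr]

-- ===== VERDICT (by name: the statement is the Claim_ definition above) =====
theorem get_gene_count_spec : Claim_equal_get_gene_count := by
  intro group _
  show get_gene_count group = get_gene_count_alt group
  cases group with
  | nil => rfl
  | cons h t =>
    unfold get_gene_count get_gene_count_alt
    simp only [List.foldl_cons]
    have h1 : pvStepA ([], [], (0 : Int)) h = ([], [], 1) := by
      simp [pvStepA]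
    rw [h1, get_gene_count_loop t [] [] 1 (by omega), pvLoopB_eq]
    simp [funext pvF_eq_pvRowB]
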